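-- pv_equiv track=rewrite | github.com/Justme-Cliff/FinanceGPT | train_tokenizer.py | pre_tokenize
-- ===== SOURCE A (Python) =====
-- FINANCE_ATOMS = sorted([
--     "ebitda","ebit","ebitdac","cagr","wacc","capm","roe","roa","roce",
--     "eps","bvps","fcf","ocf","dcf","ltv","ltm","ntm",
--     "etf","reit","spac","cdo","cds","clo","mbs","abs","cmbs",
--     "ipo","apo","spo","dpo",
--     "libor","sofr","shibor","euribor","ffr",
--     "sharpe","sortino","treynor","calmar","omega",
--     "p/e","p/b","p/s","p/fcf","ev/ebitda","ev/ebit","ev/sales",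
--     "401k","403b","457b","ira","roth","hsa","fsa",
--     "defi","nft","dao","dex","cex","amm","tvl",
--     "esg","sri","unpri",
--     "gdp","cpi","ppi","pce","ism","pmi","nfp",
-- ], key=len, reverse=True)   # longest-first for greedy matching
--
-- def pre_tokenize(text):
--     """Split text into words the same way the C runtime will."""
--     words = []
--     i, n = 0, len(text)
--     while i < n:
--         while i < n and text[i].isspace():
--             i += 1
--         if i >= n:
--             break
--
--         # Dollar-prefixed number: $1,234.56%
--         if text[i] == '$' and i + 1 < n and text[i+1].isdigit():
--             j = i + 1
--             while j < n and (text[j].isdigit() or text[j] in ',.'):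
--                 j += 1
--             if j < n and text[j] == '%':
--                 j += 1
--             words.append(text[i:j])
--             i = j
--             continue
--
--         # Plain number, maybe with trailing %
--         if text[i].isdigit():
--             j = i
--             while j < n and (text[j].isdigit() or text[j] in ',.'):
--                 j += 1
--             if j < n and text[j] == '%':
--                 j += 1
--                 words.append(text[i:j])
--                 i = j
--                 continue
--             # Check for a finance atom that starts with digits (e.g. 401k)
--             if j < n and text[j].isalpha():
--                 cand = text[i:j].lower()
--                 k = j
--                 while k < n and text[k].isalpha():
--                     cand += text[k].lower()
--                     k += 1
--                 if cand in FINANCE_ATOMS: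
--                     words.append(cand)
--                     i = k
--                     continue
--             words.append(text[i:j])
--             i = j
--             continue
--
--         # Finance atom (alpha start)
--         matched = False
--         low = text[i:].lower()
--         for atom in FINANCE_ATOMS:
--             if low.startswith(atom):
--                 end = i + len(atom)
--                 if end >= n or not (text[end].isalnum() or text[end] == '_'):
--                     words.append(atom)
--                     i = end
--                     matched = True
--                     break
--         if matched:
--             continue
--
--         # Alphabetic run (apostrophe / hyphen / slash allowed inside)
--         if text[i].isalpha():
--             j = i
--             while j < n and (text[j].isalpha() or text[j] in "'/-"):
--                 j += 1
--             words.append(text[i:j].lower())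
--             i = j
--             continue
--
--         # Any other single non-whitespace character
--         words.append(text[i])
--         i += 1
--
--     return words
-- ===== SOURCE B (Python) =====
-- FINANCE_ATOMS = frozenset([
--     "ebitda","ebit","ebitdac","cagr","wacc","capm","roe","roa","roce",
--     "eps","bvps","fcf","ocf","dcf","ltv","ltm","ntm",
--     "etf","reit","spac","cdo","cds","clo","mbs","abs","cmbs",
--     "ipo","apo","spo","dpo",
--     "libor","sofr","shibor","euribor","ffr",
--     "sharpe","sortino","treynor","calmar","omega",
--     "p/e","p/b","p/s","p/fcf","ev/ebitda","ev/ebit","ev/sales",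
--     "401k","403b","457b","ira","roth","hsa","fsa",
--     "defi","nft","dao","dex","cex","amm","tvl",
--     "esg","sri","unpri",
--     "gdp","cpi","ppi","pce","ism","pmi","nfp",
-- ])
--
-- _MAX_ATOM = max(len(a) for a in FINANCE_ATOMS)   # 9
--
--
-- def _next_token(text, i):
--     """Skip whitespace at i and cut one token; return (token or None, next index)."""
--     n = len(text)
--     while i < n and text[i].isspace():
--         i += 1
--     if i >= n:
--         return None, i
--
--     # Dollar-prefixed number: $1,234.56%
--     if text[i] == '$' and i + 1 < n and text[i+1].isdigit():
--         j = i + 1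
--         while j < n and (text[j].isdigit() or text[j] in ',.'):
--             j += 1
--         if j < n and text[j] == '%':
--             j += 1
--         return text[i:j], j
--
--     # Plain number, maybe with trailing % or a digit-led atom such as 401k
--     if text[i].isdigit():
--         j = i
--         while j < n and (text[j].isdigit() or text[j] in ',.'):
--             j += 1
--         if j < n and text[j] == '%':
--             return text[i:j+1], j + 1
--         if j < n and text[j].isalpha():
--             k = j
--             while k < n and text[k].isalpha():
--                 k += 1
--             cand = text[i:k].lower()
--             if cand in FINANCE_ATOMS:
--                 return cand, k
--         return text[i:j], j
--
--     # Finance atom: probe the hash set with the (at most 9) decreasing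
--     # prefix lengths instead of scanning a length-sorted atom list.
--     for L in range(_MAX_ATOM, 0, -1):
--         if i + L > n:
--             continue
--         cand = text[i:i+L].lower()
--         if cand in FINANCE_ATOMS:
--             end = i + L
--             if end >= n or not (text[end].isalnum() or text[end] == '_'):
--                 return cand, end
--
--     # Alphabetic run (apostrophe / hyphen / slash allowed inside)
--     if text[i].isalpha():
--         j = i
--         while j < n and (text[j].isalpha() or text[j] in "'/-"):
--             j += 1
--         return text[i:j].lower(), j
--
--     # Any other single non-whitespace character
--     return text[i], i + 1
--
--
-- def pre_tokenize(text):
--     """Split text into words the same way the C runtime will."""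
--     words = []
--     i, n = 0, len(text)
--     while i < n:
--         tok, i = _next_token(text, i)
--         if tok is not None:
--             words.append(tok)
--     return words
-- ===== Notes on version B (the rewrite author's own statement) =====
-- stated objective: alternative
-- what changed: B factors the loop body into a _next_token helper and replaces A's per-position scan of the 71-entry length-sorted atom list (which lowercases the whole remaining suffix with text[i:].lower()) by at most 9 frozenset probes of the decreasing-length lowercased prefixes, keeping the identical boundary test; the sorted() call disappears.
import Mathlib
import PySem

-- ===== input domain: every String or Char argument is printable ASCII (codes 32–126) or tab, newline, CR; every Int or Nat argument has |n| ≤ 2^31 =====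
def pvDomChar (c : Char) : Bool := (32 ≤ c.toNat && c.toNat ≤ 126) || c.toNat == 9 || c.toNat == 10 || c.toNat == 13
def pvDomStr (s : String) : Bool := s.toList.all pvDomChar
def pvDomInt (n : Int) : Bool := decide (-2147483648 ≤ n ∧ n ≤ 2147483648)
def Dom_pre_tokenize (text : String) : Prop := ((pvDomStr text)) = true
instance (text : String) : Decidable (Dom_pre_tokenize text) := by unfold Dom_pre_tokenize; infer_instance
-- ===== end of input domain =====

-- B cuts one token per call of a _next_token helper and, for the finance-atom match, probes a
-- hash set with the at most 9 decreasing prefix lengths instead of scanning the whole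
-- length-sorted 71-atom list against the lowercased suffix (objective: alternative).

-- ===== PORT A =====

-- the atom list in the order it is written in the Python source
def pvRawAtoms : List String := [
    "ebitda","ebit","ebitdac","cagr","wacc","capm","roe","roa","roce",
    "eps","bvps","fcf","ocf","dcf","ltv","ltm","ntm",
    "etf","reit","spac","cdo","cds","clo","mbs","abs","cmbs",
    "ipo","apo","spo","dpo",
    "libor","sofr","shibor","euribor","ffr",
    "sharpe","sortino","treynor","calmar","omega",
    "p/e","p/b","p/s","p/fcf","ev/ebitda","ev/ebit","ev/sales",
    "401k","403b","457b","ira","roth","hsa","fsa",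
    "defi","nft","dao","dex","cex","amm","tvl",
    "esg","sri","unpri",
    "gdp","cpi","ppi","pce","ism","pmi","nfp"]

-- FINANCE_ATOMS = sorted(raw, key=len, reverse=True)
def pvAtomsA : List String := PySem.List.sorted pvRawAtoms PySem.Str.len true

-- text[i] under the guards 0 ≤ i < len(text) that both Pythons always establish first
def pvChAt (t : List Char) (i : Nat) : Char := t.getD i ' '
-- text[i:j] for 0 ≤ i ≤ j ≤ n (the only way both Pythons slice)
def pvSub (t : List Char) (i j : Nat) : List Char := (t.drop i).take (j - i)

-- 'while j < n and p(text[j]): j += 1' (shared: both Pythons contain these loops verbatim)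
def pvScan (p : Char → Bool) (t : List Char) (n j : Nat) : Nat :=
  if h : j < n ∧ p (pvChAt t j) then pvScan p t n (j + 1) else j
termination_by n - j
decreasing_by omega

def pvIsNumCh (c : Char) : Bool := PySem.Chars.isdigit c || c = ',' || c = '.'
def pvIsRunCh (c : Char) : Bool := PySem.Chars.isalpha c || c = '\'' || c = '/' || c = '-'
-- 'end >= n or not (text[end].isalnum() or text[end] == "_")'
def pvBoundary (t : List Char) (n e : Nat) : Bool :=
  decide (n ≤ e) || !(PySem.Chars.isalnum (pvChAt t e) || pvChAt t e == '_')

-- A's 'for atom in FINANCE_ATOMS: if low.startswith(atom): …'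
def pvAtomScanA (t : List Char) (n i : Nat) (low : List Char) : List String → Option (String × Nat)
  | [] => none
  | a :: rest =>
    if a.toList.isPrefixOf low then
      if pvBoundary t n (i + a.toList.length) then some (a, i + a.toList.length)
      else pvAtomScanA t n i low rest
    else pvAtomScanA t n i low rest

-- A's outer 'while i < n' loop (fuel: i strictly increases each iteration, so n+1 is enough)
def pvLoopA (t : List Char) (n : Nat) : Nat → Nat → List String → List String
  | 0, _, acc => acc
  | fuel + 1, i0, acc =>
    let i := pvScan PySem.Chars.isspace t n i0
    if n ≤ i then acc
    else if pvChAt t i = '$' ∧ i + 1 < n ∧ PySem.Chars.isdigit (pvChAt t (i + 1)) = true then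
      let j0 := pvScan pvIsNumCh t n (i + 1)
      let j := if j0 < n ∧ pvChAt t j0 = '%' then j0 + 1 else j0
      pvLoopA t n fuel j (acc ++ [String.ofList (pvSub t i j)])
    else if PySem.Chars.isdigit (pvChAt t i) = true then
      let j := pvScan pvIsNumCh t n i
      if j < n ∧ pvChAt t j = '%' then
        pvLoopA t n fuel (j + 1) (acc ++ [String.ofList (pvSub t i (j + 1))])
      else if j < n ∧ PySem.Chars.isalpha (pvChAt t j) = true then
        -- 'cand = text[i:j].lower()' then the char-by-char 'cand += text[k].lower()' loop
        let k := pvScan PySem.Chars.isalpha t n j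
        let cand := String.ofList (PySem.Chars.lower (pvSub t i j) ++ PySem.Chars.lower (pvSub t j k))
        if pvAtomsA.contains cand then pvLoopA t n fuel k (acc ++ [cand])
        else pvLoopA t n fuel j (acc ++ [String.ofList (pvSub t i j)])
      else pvLoopA t n fuel j (acc ++ [String.ofList (pvSub t i j)])
    else
      match pvAtomScanA t n i (PySem.Chars.lower (t.drop i)) pvAtomsA with
      | some (a, e) => pvLoopA t n fuel e (acc ++ [a])
      | none =>
        if PySem.Chars.isalpha (pvChAt t i) = true then
          let j := pvScan pvIsRunCh t n i
          pvLoopA t n fuel j (acc ++ [String.ofList (PySem.Chars.lower (pvSub t i j))])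
        else pvLoopA t n fuel (i + 1) (acc ++ [String.ofList [pvChAt t i]])

def pre_tokenize (text : String) : List String :=
  pvLoopA text.toList text.toList.length (text.toList.length + 1) 0 []

-- ===== PORT B =====

-- FINANCE_ATOMS = frozenset([…]) (same literals, no sorting)
def pvAtomsB : PySem.Set String := PySem.Set.ofList pvRawAtoms

-- _MAX_ATOM = max(len(a) for a in FINANCE_ATOMS)
def pvMaxAtom : Nat := (pvAtomsB.map (fun a => a.toList.length)).foldl Nat.max 0

-- B's 'for L in range(_MAX_ATOM, 0, -1): …' hash-set probe (m = _MAX_ATOM, passed down like t, n)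
def pvAtomProbeB (t : List Char) (n i : Nat) : Nat → Option (String × Nat)
  | 0 => none
  | L + 1 =>
    if i + (L + 1) ≤ n then
      let cand := String.ofList (PySem.Chars.lower (pvSub t i (i + (L + 1))))
      if pvAtomsB.contains cand ∧ pvBoundary t n (i + (L + 1)) = true then some (cand, i + (L + 1))
      else pvAtomProbeB t n i L
    else pvAtomProbeB t n i L

-- B's _next_token(text, i): skip whitespace, then cut one token
def pvNextTok (t : List Char) (n m i0 : Nat) : Option String × Nat :=
  let i := pvScan PySem.Chars.isspace t n i0
  if n ≤ i then (none, i)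
  else if pvChAt t i = '$' ∧ i + 1 < n ∧ PySem.Chars.isdigit (pvChAt t (i + 1)) = true then
    let j0 := pvScan pvIsNumCh t n (i + 1)
    let j := if j0 < n ∧ pvChAt t j0 = '%' then j0 + 1 else j0
    (some (String.ofList (pvSub t i j)), j)
  else if PySem.Chars.isdigit (pvChAt t i) = true then
    let j := pvScan pvIsNumCh t n i
    if j < n ∧ pvChAt t j = '%' then (some (String.ofList (pvSub t i (j + 1))), j + 1)
    else if j < n ∧ PySem.Chars.isalpha (pvChAt t j) = true then
      let k := pvScan PySem.Chars.isalpha t n j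
      let cand := String.ofList (PySem.Chars.lower (pvSub t i k))
      if pvAtomsB.contains cand then (some cand, k)
      else (some (String.ofList (pvSub t i j)), j)
    else (some (String.ofList (pvSub t i j)), j)
  else
    match pvAtomProbeB t n i m with
    | some (a, e) => (some a, e)
    | none =>
      if PySem.Chars.isalpha (pvChAt t i) = true then
        let j := pvScan pvIsRunCh t n i
        (some (String.ofList (PySem.Chars.lower (pvSub t i j))), j)
      else (some (String.ofList [pvChAt t i]), i + 1)

-- B's 'while i < n: tok, i = _next_token(text, i); if tok is not None: words.append(tok)'
def pvLoopB (t : List Char) (n m : Nat) : Nat → Nat → List String → List String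
  | 0, _, acc => acc
  | fuel + 1, i0, acc =>
    if n ≤ i0 then acc
    else
      match pvNextTok t n m i0 with
      | (some w, i') => pvLoopB t n m fuel i' (acc ++ [w])
      | (none, i') => pvLoopB t n m fuel i' acc

def pre_tokenize_alt (text : String) : List String :=
  pvLoopB text.toList text.toList.length pvMaxAtom (text.toList.length + 1) 0 []

-- ===== PRECONDITION & SPEC =====
def Spec_pre_tokenize (text : String) (out : List String) : Prop := out = pre_tokenize_alt text
instance (text : String) (out : List String) : Decidable (Spec_pre_tokenize text out) := by unfold Spec_pre_tokenize; infer_instance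

-- ===== CLAIM (what is proved, stated in full; the proofs are below) =====
def Claim_equal_pre_tokenize : Prop := ∀ (text : String), Dom_pre_tokenize text → Spec_pre_tokenize text (pre_tokenize text)

-- ===== LEMMAS AND PROOFS =====

theorem pvScan_stop (p : Char → Bool) (t : List Char) (n j : Nat) (h : ¬ j < n) :
    pvScan p t n j = j := by
  rw [pvScan, dif_neg (by tauto)]

theorem pvScan_ge (p : Char → Bool) (t : List Char) (n : Nat) (j : Nat) : j ≤ pvScan p t n j := by
  have key : ∀ d j, n - j ≤ d → j ≤ pvScan p t n j := by
    intro d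
    induction d with
    | zero => intro j h; rw [pvScan_stop p t n j (by omega)]
    | succ d ihd =>
      intro j h
      rw [pvScan]
      split
      · next hc => exact le_trans (by omega) (ihd (j + 1) (by omega))
      · exact le_rfl
  exact key (n - j) j le_rfl

theorem pvSub_glue (t : List Char) (i j k : Nat) (hij : i ≤ j) (hjk : j ≤ k) :
    pvSub t i j ++ pvSub t j k = pvSub t i k := by
  unfold pvSub
  have h1 : k - i = (j - i) + (k - j) := by omega
  have h2 : List.drop (j - i) (List.drop i t) = List.drop j t := by
    rw [List.drop_drop]; congr 1; omega
  rw [h1, List.take_add, h2]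

theorem pvLower_glue (t : List Char) (i j k : Nat) (hij : i ≤ j) (hjk : j ≤ k) :
    PySem.Chars.lower (pvSub t i j) ++ PySem.Chars.lower (pvSub t j k)
      = PySem.Chars.lower (pvSub t i k) := by
  simp only [PySem.Chars.lower, ← List.map_append, pvSub_glue t i j k hij hjk]

theorem pvAtomScanA_append (t : List Char) (n i : Nat) (low : List Char) (xs ys : List String) :
    pvAtomScanA t n i low (xs ++ ys) = (pvAtomScanA t n i low xs).or (pvAtomScanA t n i low ys) := by
  induction xs with
  | nil => simp [pvAtomScanA]
  | cons a rest ih =>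
    simp only [List.cons_append, pvAtomScanA]
    split_ifs <;> simp [ih]

theorem pvAtomScanA_const_len (t : List Char) (n i : Nat) (low : List Char) (L : Nat)
    (blk : List String) (hlen : ∀ a ∈ blk, a.toList.length = L) :
    pvAtomScanA t n i low blk =
      if L ≤ low.length ∧ String.ofList (low.take L) ∈ blk ∧ pvBoundary t n (i + L) = true
      then some (String.ofList (low.take L), i + L) else none := by
  induction blk with
  | nil => simp [pvAtomScanA]
  | cons a rest ih =>
    have hA : a.toList.length = L := hlen a (List.mem_cons_self ..)
    have ih' := ih (fun b hb => hlen b (List.mem_cons_of_mem a hb))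
    simp only [pvAtomScanA, hA]
    cases hP : a.toList.isPrefixOf low with
    | true =>
      have hp : a.toList <+: low := List.isPrefixOf_iff_prefix.mp hP
      have htake : low.take L = a.toList := by rw [← hA]; exact (List.prefix_iff_eq_take.mp hp).symm
      have hmk : String.ofList (low.take L) = a := by rw [htake, String.ofList_toList]
      have hLlen : L ≤ low.length := hA ▸ hp.length_le
      rw [if_pos rfl]
      cases hB : pvBoundary t n (i + L) with
      | true =>
        rw [if_pos rfl, if_pos ⟨hLlen, by rw [hmk]; exact List.mem_cons_self .., rfl⟩, hmk]
      | false =>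
        rw [if_neg (by simp), ih',
          if_neg (by rintro ⟨-, -, h3⟩; rw [hB] at h3; exact Bool.false_ne_true h3),
          if_neg (by rintro ⟨-, -, h3⟩; exact Bool.false_ne_true h3)]
    | false =>
      have hp : ¬ a.toList <+: low := by
        intro h; rw [List.isPrefixOf_iff_prefix.mpr h] at hP; exact absurd hP (by simp)
      rw [if_neg (by simp), ih']
      have hne : L ≤ low.length → String.ofList (low.take L) ≠ a := by
        intro hL he
        apply hp
        have h2 : a.toList = low.take L := by rw [← he, String.toList_ofList]
        rw [h2]; exact List.take_prefix L low
      refine if_congr ?_ rfl rfl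
      constructor
      · rintro ⟨h1, h2, h3⟩; exact ⟨h1, List.mem_cons_of_mem _ h2, h3⟩
      · rintro ⟨h1, h2, h3⟩
        rcases List.mem_cons.mp h2 with h | h
        · exact absurd h (hne h1)
        · exact ⟨h1, h, h3⟩

set_option maxRecDepth 40000 in
theorem pvFilter_zero : pvAtomsA.filter (fun a => decide (a.toList.length ≤ 0)) = [] := by decide

set_option maxRecDepth 40000 in
theorem pvFilter_split : ∀ L, L < 9 → pvAtomsA.filter (fun a => decide (a.toList.length ≤ L+1)) = pvAtomsA.filter (fun a => decide (a.toList.length = L+1)) ++ pvAtomsA.filter (fun a => decide (a.toList.length ≤ L)) := by decide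

set_option maxRecDepth 40000 in
theorem pvFilter_full : pvAtomsA.filter (fun a => decide (a.toList.length ≤ 9)) = pvAtomsA := by decide

set_option maxRecDepth 40000 in
theorem pvMaxAtom_eq : pvMaxAtom = 9 := by decide

set_option maxRecDepth 40000 in
theorem pvMemA_iff_containsB (s : String) : s ∈ pvAtomsA ↔ pvAtomsB.contains s = true := by
  have h : s ∈ pvAtomsA ↔ s ∈ pvAtomsB := by
    unfold pvAtomsA pvAtomsB
    rw [PySem.List.mem_sorted]
    exact (PySem.Set.mem_ofList pvRawAtoms s).symm
  exact h.trans List.contains_iff_mem.symm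

set_option maxRecDepth 40000 in
theorem pvContains_eq (s : String) : pvAtomsA.contains s = pvAtomsB.contains s := by
  have h := (List.contains_iff_mem (as := pvAtomsA) (a := s)).trans (pvMemA_iff_containsB s)
  cases hc : pvAtomsB.contains s
  · rw [hc] at h
    exact Bool.eq_false_iff.mpr (fun hT => Bool.false_ne_true (h.mp hT))
  · exact h.mpr hc

theorem pvScanA_filter_eq_probe (t : List Char) (i : Nat) :
    ∀ L, L ≤ 9 →
      pvAtomScanA t t.length i (PySem.Chars.lower (t.drop i))
          (pvAtomsA.filter (fun a => decide (a.toList.length ≤ L)))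
        = pvAtomProbeB t t.length i L := by
  have hlow : (PySem.Chars.lower (t.drop i)).length = t.length - i := by
    simp [PySem.Chars.lower]
  intro L
  induction L with
  | zero => intro _; rw [pvFilter_zero]; simp [pvAtomScanA, pvAtomProbeB]
  | succ L IHL =>
    intro hL9
    rw [pvFilter_split L (by omega), pvAtomScanA_append,
      pvAtomScanA_const_len t t.length i _ (L+1) _
        (fun a ha => by simpa using (List.mem_filter.mp ha).2)]
    have hc : PySem.Chars.lower (pvSub t i (i + (L+1))) = (PySem.Chars.lower (t.drop i)).take (L+1) := by
      simp [pvSub, PySem.Chars.lower, List.map_take]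
    simp only [pvAtomProbeB, hc]
    by_cases hin : i + (L+1) ≤ t.length
    · have h1 : (L+1) ≤ (PySem.Chars.lower (t.drop i)).length := by omega
      rw [if_pos hin]
      have hlen2 : (String.ofList ((PySem.Chars.lower (t.drop i)).take (L+1))).toList.length = L+1 := by
        simp [String.toList_ofList, List.length_take]; omega
      have hmem : (String.ofList ((PySem.Chars.lower (t.drop i)).take (L+1)) ∈ pvAtomsA.filter (fun a => decide (a.toList.length = L+1)))
          ↔ pvAtomsB.contains (String.ofList ((PySem.Chars.lower (t.drop i)).take (L+1))) = true := by
        rw [List.mem_filter, ← pvMemA_iff_containsB]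
        constructor
        · rintro ⟨hm, -⟩; exact hm
        · intro hm; exact ⟨hm, decide_eq_true hlen2⟩
      by_cases hcb : pvAtomsB.contains (String.ofList ((PySem.Chars.lower (t.drop i)).take (L+1))) = true ∧ pvBoundary t t.length (i + (L+1)) = true
      · rw [if_pos ⟨h1, hmem.mpr hcb.1, hcb.2⟩, if_pos hcb]
        rfl
      · rw [if_neg (by rintro ⟨-, h2, h3⟩; exact hcb ⟨hmem.mp h2, h3⟩), if_neg hcb]
        rw [Option.none_or]
        exact IHL (by omega)
    · rw [if_neg (by rintro ⟨h1, -⟩; omega), if_neg hin, Option.none_or]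
      exact IHL (by omega)

theorem pvScanA_eq_probe (t : List Char) (i : Nat) :
    pvAtomScanA t t.length i (PySem.Chars.lower (t.drop i)) pvAtomsA = pvAtomProbeB t t.length i pvMaxAtom := by
  rw [pvMaxAtom_eq, ← pvFilter_full]
  exact pvScanA_filter_eq_probe t i 9 le_rfl

theorem pvLoopB_stop (t : List Char) (n m : Nat) (fuel i : Nat) (acc : List String) (h : n ≤ i) :
    pvLoopB t n m fuel i acc = acc := by
  cases fuel with
  | zero => rfl
  | succ fuel => rw [pvLoopB, if_pos h]

theorem pvLoop_eq (t : List Char) :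
    ∀ fuel i0 acc, pvLoopA t t.length fuel i0 acc = pvLoopB t t.length pvMaxAtom fuel i0 acc := by
  intro fuel
  induction fuel with
  | zero => intro _ _; rfl
  | succ fuel ih =>
    intro i0 acc
    simp only [pvLoopA, pvLoopB]
    by_cases h0 : t.length ≤ i0
    · rw [pvScan_stop _ _ _ _ (by omega), if_pos h0, if_pos h0]
    · rw [if_neg h0]
      simp only [pvNextTok]
      rw [pvScanA_eq_probe]
      rw [pvLower_glue t _ _ _ (pvScan_ge _ _ _ _) (pvScan_ge _ _ _ _)]
      rw [pvContains_eq]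
      cases hpr : pvAtomProbeB t t.length (pvScan PySem.Chars.isspace t t.length i0) pvMaxAtom with
      | some p =>
        obtain ⟨a, e⟩ := p
        split_ifs with h1 <;> simp only [ih] <;>
          first
            | rfl
            | exact (pvLoopB_stop _ _ _ _ _ _ h1).symm
      | none =>
        split_ifs with h1 <;> simp only [ih] <;>
          first
            | rfl
            | exact (pvLoopB_stop _ _ _ _ _ _ h1).symm

theorem pre_tokenize_spec : Claim_equal_pre_tokenize := by
  intro text _
  unfold Spec_pre_tokenize pre_tokenize pre_tokenize_alt
  exact pvLoop_eq text.toList (text.toList.length + 1) 0 []
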